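-- pv_equiv track=rewrite | github.com/84zume/AtCoder | contests/src/abc098/abc098_b/main.py | solve
-- ===== SOURCE A (Python) =====
-- def solve(N, S):
--     i = 1
--     count = 0
--     while i < N:
--         X = set(S[:i])
--         Y = set(S[i:])
--         Z = X & Y
--         count = max(count, len(list(Z)))
--         i += 1
--     return count
-- ===== SOURCE B (Python) =====
-- def solve(N, S):
--     # one left-to-right sweep: suffix character counts + incremental prefix set,
--     # maintaining the number of characters common to both sides
--     suffix = {}
--     for c in S:
--         suffix[c] = suffix.get(c, 0) + 1
--     prefix = set()
--     common = 0
--     best = 0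
--     for i in range(1, N):
--         if i - 1 < len(S):
--             c = S[i - 1]
--             suffix[c] -= 1
--             if c in prefix:
--                 if suffix[c] == 0:
--                     common -= 1
--             else:
--                 prefix.add(c)
--                 if suffix[c] > 0:
--                     common += 1
--         best = max(best, common)
--     return best
-- ===== Notes on version B (the rewrite author's own statement) =====
-- stated objective: faster
-- what changed: Instead of rebuilding set(S[:i]) and set(S[i:]) from scratch for every split, B precomputes suffix character counts once and sweeps left to right, incrementally maintaining the prefix set and the number of characters common to both sides.
import Mathlib
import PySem

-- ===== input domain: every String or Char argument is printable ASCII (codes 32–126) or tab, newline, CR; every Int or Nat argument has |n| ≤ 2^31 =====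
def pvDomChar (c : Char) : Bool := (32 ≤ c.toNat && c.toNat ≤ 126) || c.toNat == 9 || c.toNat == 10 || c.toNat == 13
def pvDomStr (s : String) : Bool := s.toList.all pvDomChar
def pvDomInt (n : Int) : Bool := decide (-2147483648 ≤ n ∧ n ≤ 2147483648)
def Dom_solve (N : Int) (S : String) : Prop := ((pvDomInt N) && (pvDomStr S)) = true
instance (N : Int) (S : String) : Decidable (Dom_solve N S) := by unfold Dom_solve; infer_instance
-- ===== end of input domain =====

-- B replaces A's per-split set rebuilding by one left-to-right sweep keeping suffix
-- character counts and an incremental prefix set (objective: faster).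


-- ===== PORT A =====
-- A's while loop: i from 1 while i < N; count = max(count, len(list(set(S[:i]) & set(S[i:]))))
def solveLoopA (N : Int) (cs : List Char) (i : Int) (count : Int) : Int :=
  if i < N then
    let X := PySem.Set.ofList (PySem.List.slice cs none (some i))
    let Y := PySem.Set.ofList (PySem.List.slice cs (some i) none)
    let Z := PySem.Set.inter X Y
    solveLoopA N cs (i + 1) (max count (Z.length : Int))
  else count
termination_by (N - i).toNat
decreasing_by omega

def solve (N : Int) (S : String) : Int := solveLoopA N S.toList 1 0

-- ===== PORT B =====
-- one iteration of B's sweep at split i: consume S[i-1] (when it exists), update the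
-- suffix counter, the prefix set and the running count `common` of characters present
-- on both sides, then best = max(best, common)
def solveStepB (cs : List Char) (st : PySem.Dict Char Int × PySem.Set Char × Int × Int)
    (i : Int) : PySem.Dict Char Int × PySem.Set Char × Int × Int :=
  match st with
  | (sfx, pfx, common, best) =>
    let next :=
      if i - 1 < (cs.length : Int) then
        match PySem.List.pyGet? cs (i - 1) with
        | some c =>
          let s2 := sfx.modify c 0 (· - 1)
          if pfx.contains c then
            (s2, pfx, if s2.getD c 0 = 0 then common - 1 else common)
          else
            (s2, pfx.add c, if 0 < s2.getD c 0 then common + 1 else common)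
        | none => (sfx, pfx, common)   -- unreachable: 1 ≤ i in the loop below
      else (sfx, pfx, common)
    (next.1, next.2.1, next.2.2, max best next.2.2)

def solve_alt (N : Int) (S : String) : Int :=
  let cs := S.toList
  let suffix0 := cs.foldl (fun d c => d.insert c (d.getD c 0 + 1)) PySem.Dict.empty
  ((PySem.List.pyRange 1 N 1).foldl (solveStepB cs) (suffix0, PySem.Set.empty, 0, 0)).2.2.2

-- ===== PRECONDITION & SPEC =====
def Spec_solve (N : Int) (S : String) (out : Int) : Prop := out = solve_alt N S
instance (N : Int) (S : String) (out : Int) : Decidable (Spec_solve N S out) := by unfold Spec_solve; infer_instance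

-- ===== CLAIM (what is proved, stated in full; the proofs are below) =====
def Claim_equal_solve : Prop := ∀ (N : Int) (S : String), Dom_solve N S → Spec_solve N S (solve N S)

-- ===== LEMMAS AND PROOFS =====

-- the value A computes for one split point i
def gA (cs : List Char) (i : Int) : Int :=
  ((PySem.Set.inter (PySem.Set.ofList (PySem.List.slice cs none (some i)))
      (PySem.Set.ofList (PySem.List.slice cs (some i) none))).length : Int)

-- the value B's `common` maintains after k consumed characters
def cntB (cs : List Char) (k : Nat) : Nat :=
  (PySem.Set.ofList (cs.take k)).countP (fun x => decide (0 < (cs.drop k).count x))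

lemma gA_eq_cntB (cs : List Char) (i : Int) (h : 0 ≤ i) :
    gA cs i = (cntB cs i.toNat : Int) := by
  lift i to ℕ using h
  simp only [gA, cntB, Int.toNat_natCast, PySem.List.slice_to_natCast,
    PySem.List.slice_from_natCast, PySem.Set.inter]
  congr 1
  rw [← List.countP_eq_length_filter]
  apply List.countP_congr
  intro x _
  simp [PySem.Set.mem_ofList, List.count_pos_iff]

lemma loopA_eq (N : Int) (cs : List Char) (i count : Int) :
    solveLoopA N cs i count
      = (PySem.List.pyRange i N 1).foldl (fun acc j => max acc (gA cs j)) count := by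
  generalize hf : (N - i).toNat = fuel
  induction fuel generalizing i count with
  | zero =>
    rw [solveLoopA, if_neg (by omega), PySem.List.pyRange_one_eq_nil (by omega), List.foldl_nil]
  | succ f ih =>
    rw [solveLoopA]
    by_cases h : i < N
    · simp only [if_pos h]
      rw [PySem.List.pyRange_one_cons h, List.foldl_cons]
      exact ih (i + 1) _ (by omega)
    · rw [if_neg h, PySem.List.pyRange_one_eq_nil (by omega), List.foldl_nil]

-- the crux: how the number of characters common to both sides changes when the split
-- moves one step to the right (the consumed character is cs[k])
lemma cntB_succ (cs : List Char) (k : Nat) (hk : k < cs.length) :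
    (cntB cs (k + 1) : Int) =
      if cs[k] ∈ cs.take k then
        (if (cs.drop (k + 1)).count cs[k] = 0 then (cntB cs k : Int) - 1 else (cntB cs k : Int))
      else
        (if 0 < (cs.drop (k + 1)).count cs[k] then (cntB cs k : Int) + 1 else (cntB cs k : Int)) := by
  have htake : cs.take (k + 1) = cs.take k ++ [cs[k]] := by
    rw [List.take_add_one, List.getElem?_eq_getElem hk]; rfl
  have hdrop : cs.drop k = cs[k] :: cs.drop (k + 1) := List.drop_eq_getElem_cons hk
  have hc0 : 0 < (cs.drop k).count cs[k] := by
    rw [hdrop, List.count_cons_self]; omega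
  have hcongr : ∀ x, x ≠ cs[k] →
      ((decide (0 < (cs.drop k).count x) = true) ↔ (decide (0 < (cs.drop (k + 1)).count x) = true)) := by
    intro x hx
    rw [hdrop, List.count_cons]
    have hbe : (cs[k] == x) = false := by simp [Ne.symm hx]
    simp [hbe]
  have hA : (PySem.Set.ofList (cs.take k)).Nodup := PySem.Set.nodup_ofList _
  unfold cntB
  rw [htake, PySem.Set.ofList_append_singleton]
  by_cases hmem : cs[k] ∈ cs.take k
  · rw [if_pos hmem]
    have hcA : cs[k] ∈ PySem.Set.ofList (cs.take k) := (PySem.Set.mem_ofList _ _).mpr hmem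
    rw [PySem.Set.add_of_mem hcA]
    have hperm := List.perm_cons_erase hcA
    have e2 : ((PySem.Set.ofList (cs.take k)).countP (fun x => decide (0 < (cs.drop (k+1)).count x)))
        = ((PySem.Set.ofList (cs.take k)).erase cs[k]).countP (fun x => decide (0 < (cs.drop (k+1)).count x))
          + (if 0 < (cs.drop (k+1)).count cs[k] then 1 else 0) := by
      rw [List.Perm.countP_eq _ hperm, List.countP_cons]
      simp
    have e1 : ((PySem.Set.ofList (cs.take k)).countP (fun x => decide (0 < (cs.drop k).count x)))
        = ((PySem.Set.ofList (cs.take k)).erase cs[k]).countP (fun x => decide (0 < (cs.drop k).count x)) + 1 := by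
      rw [List.Perm.countP_eq _ hperm, List.countP_cons]
      simp [hc0]
    have eer : (((PySem.Set.ofList (cs.take k)).erase cs[k]).countP (fun x => decide (0 < (cs.drop k).count x)))
        = ((PySem.Set.ofList (cs.take k)).erase cs[k]).countP (fun x => decide (0 < (cs.drop (k+1)).count x)) := by
      apply List.countP_congr
      intro x hx
      exact hcongr x ((hA.mem_erase_iff.mp hx).1)
    rw [e2, e1, eer]
    split_ifs <;> omega
  · rw [if_neg hmem]
    have hcA : cs[k] ∉ PySem.Set.ofList (cs.take k) := fun h => hmem ((PySem.Set.mem_ofList _ _).mp h)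
    rw [PySem.Set.add_of_not_mem hcA, List.countP_append]
    have e0 : ((PySem.Set.ofList (cs.take k)).countP (fun x => decide (0 < (cs.drop (k+1)).count x)))
        = (PySem.Set.ofList (cs.take k)).countP (fun x => decide (0 < (cs.drop k).count x)) := by
      apply List.countP_congr
      intro x hx
      exact (hcongr x (fun he => hmem (he ▸ (PySem.Set.mem_ofList _ _).mp hx))).symm
    rw [e0]
    simp only [List.countP_cons, List.countP_nil, decide_eq_true_eq, Nat.zero_add]
    split_ifs <;> omega

-- one step of B preserves the sweep invariant and records max b (common at split a)
lemma stepB_spec (cs : List Char) (a : Int) (ha : 1 ≤ a)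
    (d : PySem.Dict Char Int) (p : PySem.Set Char) (m b : Int)
    (h1 : ∀ c, d.getD c 0 = ((cs.drop (a - 1).toNat).count c : Int))
    (h2 : p = PySem.Set.ofList (cs.take (a - 1).toNat))
    (h3 : m = (cntB cs (a - 1).toNat : Int)) :
    ∃ d' p' m', solveStepB cs (d, p, m, b) a = (d', p', m', max b m') ∧
      (∀ c, d'.getD c 0 = ((cs.drop a.toNat).count c : Int)) ∧
      p' = PySem.Set.ofList (cs.take a.toNat) ∧
      m' = (cntB cs a.toNat : Int) := by
  set k := (a - 1).toNat with hkdef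
  have hk : a.toNat = k + 1 := by omega
  by_cases hlen : a - 1 < (cs.length : Int)
  · have hklen : k < cs.length := by omega
    have hidx : a - 1 = ((k : Nat) : Int) := by omega
    have hget : PySem.List.pyGet? cs (a - 1) = some cs[k] := by
      rw [hidx, PySem.List.pyGet?_natCast, List.getElem?_eq_getElem hklen]
    have hdrop : cs.drop k = cs[k] :: cs.drop (k + 1) := List.drop_eq_getElem_cons hklen
    have hd2 : ∀ c, (d.modify cs[k] 0 (· - 1)).getD c 0 = ((cs.drop a.toNat).count c : Int) := by
      intro c
      rw [hk]
      by_cases hc : c = cs[k]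
      · subst hc
        rw [PySem.Dict.getD_modify_self, h1 cs[k], hdrop, List.count_cons_self]
        push_cast
        ring
      · rw [PySem.Dict.getD_modify_of_ne _ _ _ hc, h1 c, hdrop, List.count_cons]
        have : (cs[k] == c) = false := by simp [Ne.symm hc]
        simp [this]
    have hpk : cs.take a.toNat = cs.take k ++ [cs[k]] := by
      rw [hk, List.take_add_one, List.getElem?_eq_getElem hklen]; rfl
    by_cases hmem : cs[k] ∈ cs.take k
    · have hcontains : p.contains cs[k] = true := by
        rw [h2, PySem.Set.contains_iff, PySem.Set.mem_ofList]
        exact hmem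
      refine ⟨d.modify cs[k] 0 (· - 1), p, (cntB cs a.toNat : Int), ?_, hd2, ?_, rfl⟩
      · have hm' : (if (d.modify cs[k] 0 (· - 1)).getD cs[k] 0 = 0 then m - 1 else m)
            = (cntB cs a.toNat : Int) := by
          rw [hd2 cs[k], hk, cntB_succ cs k hklen, if_pos hmem, h3]
          simp only [Int.natCast_eq_zero]
        simp only [solveStepB, if_pos hlen, hget, hcontains, if_true]
        rw [hm']
      · rw [h2, hpk, PySem.Set.ofList_append_singleton,
          PySem.Set.add_of_mem ((PySem.Set.mem_ofList _ _).mpr hmem)]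
    · have hcontains : p.contains cs[k] = false := by
        rw [h2]
        apply Bool.eq_false_iff.mpr
        intro hcon
        exact hmem ((PySem.Set.mem_ofList _ _).mp ((PySem.Set.contains_iff _ _).mp hcon))
      refine ⟨d.modify cs[k] 0 (· - 1), p.add cs[k], (cntB cs a.toNat : Int), ?_, hd2, ?_, rfl⟩
      · have hm' : (if 0 < (d.modify cs[k] 0 (· - 1)).getD cs[k] 0 then m + 1 else m)
            = (cntB cs a.toNat : Int) := by
          rw [hd2 cs[k], hk, cntB_succ cs k hklen, if_neg hmem, h3]
          simp only [Int.natCast_pos]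
        simp only [solveStepB, if_pos hlen, hget, hcontains, Bool.false_eq_true, if_false]
        rw [hm']
      · rw [h2, hpk, PySem.Set.ofList_append_singleton]
  · have hlen' : cs.length ≤ k := by omega
    have e1 : cs.drop a.toNat = cs.drop k := by
      rw [List.drop_eq_nil_of_le (by omega), List.drop_eq_nil_of_le hlen']
    have e2 : cs.take a.toNat = cs.take k := by
      rw [List.take_of_length_le (by omega), List.take_of_length_le hlen']
    have e3 : cntB cs a.toNat = cntB cs k := by
      unfold cntB
      rw [e1, e2]
    refine ⟨d, p, m, ?_, fun c => by rw [e1]; exact h1 c, by rw [e2]; exact h2, by rw [e3]; exact h3⟩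
    simp only [solveStepB, if_neg hlen]

-- B's fold over range(1, N) computes A's running maximum of gA
lemma foldB_eq (cs : List Char) (N : Int) :
    ∀ fuel (a : Int) (d : PySem.Dict Char Int) (p : PySem.Set Char) (m b : Int),
      (N - a).toNat = fuel → 1 ≤ a →
      (∀ c, d.getD c 0 = ((cs.drop (a - 1).toNat).count c : Int)) →
      p = PySem.Set.ofList (cs.take (a - 1).toNat) →
      m = (cntB cs (a - 1).toNat : Int) →
      ((PySem.List.pyRange a N 1).foldl (solveStepB cs) (d, p, m, b)).2.2.2
        = (PySem.List.pyRange a N 1).foldl (fun acc j => max acc (gA cs j)) b := by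
  intro fuel
  induction fuel with
  | zero =>
    intro a d p m b hf ha h1 h2 h3
    rw [PySem.List.pyRange_one_eq_nil (by omega), List.foldl_nil, List.foldl_nil]
  | succ f ih =>
    intro a d p m b hf ha h1 h2 h3
    by_cases h : a < N
    · rw [PySem.List.pyRange_one_cons h, List.foldl_cons, List.foldl_cons]
      obtain ⟨d', p', m', hstep, h1', h2', h3'⟩ := stepB_spec cs a ha d p m b h1 h2 h3
      rw [hstep]
      have hm : gA cs a = m' := by rw [h3', gA_eq_cntB cs a (by omega)]
      rw [hm]
      have hsub : a + 1 - 1 = a := by ring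
      refine ih (a + 1) d' p' m' (max b m') (by omega) (by omega) ?_ ?_ ?_
      · rw [hsub]; exact h1'
      · rw [hsub]; exact h2'
      · rw [hsub]; exact h3'
    · rw [PySem.List.pyRange_one_eq_nil (by omega), List.foldl_nil, List.foldl_nil]

-- ===== VERDICT (by name: the statement is the Claim_ definition above) =====
theorem solve_spec : Claim_equal_solve := by
  intro N S _
  show solve N S = solve_alt N S
  simp only [solve, solve_alt]
  rw [loopA_eq]
  refine (foldB_eq S.toList N ((N - 1).toNat) 1 _ _ _ _ rfl le_rfl ?_ rfl rfl).symm
  intro c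
  have h0 : ((1 : Int) - 1).toNat = 0 := rfl
  rw [h0, List.drop_zero, PySem.Dict.getD_foldl_insert_add_one, PySem.Dict.getD_empty, zero_add]
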